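-- pv_equiv track=rewrite | github.com/Arpithanj/Colour_sort_game | colorSort.py | get_hint
-- ===== SOURCE A (Python) =====
-- def get_hint(colors):
--     for i in range(len(colors)):
--         if len(colors[i]) > 0:
--             color_to_move = colors[i][-1]
--             for j in range(len(colors)):
--                 if i != j and len(colors[j]) < 4:
--                     if len(colors[j]) == 0 or colors[j][-1] == color_to_move:
--                         return i, j
--     return None, None
-- ===== SOURCE B (Python) =====
-- def get_hint(colors):
--     n = len(colors)
--     empties = []                      # two smallest indices of empty tubes
--     for j in range(n):
--         if len(colors[j]) == 0 and len(empties) < 2: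
--             empties.append(j)
--     tops = {}                         # top color -> two smallest indices of non-full, non-empty tubes
--     for j in range(n):
--         t = colors[j]
--         if 0 < len(t) < 4:
--             lst = tops.setdefault(t[-1], [])
--             if len(lst) < 2:
--                 lst.append(j)
--     for i in range(n):
--         t = colors[i]
--         if len(t) > 0:
--             cands = [j for j in empties + tops.get(t[-1], []) if j != i]
--             if cands:
--                 return i, min(cands)
--     return None, None
-- ===== Notes on version B (the rewrite author's own statement) =====
-- stated objective: faster
-- what changed: A's nested scan over all destination tubes per source tube is replaced by one-pass indexes (the two smallest empty-tube indices and, per top color, the two smallest non-full-tube indices in a dict) followed by a single pass over source tubes taking the min of at most four candidates.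
import Mathlib
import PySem

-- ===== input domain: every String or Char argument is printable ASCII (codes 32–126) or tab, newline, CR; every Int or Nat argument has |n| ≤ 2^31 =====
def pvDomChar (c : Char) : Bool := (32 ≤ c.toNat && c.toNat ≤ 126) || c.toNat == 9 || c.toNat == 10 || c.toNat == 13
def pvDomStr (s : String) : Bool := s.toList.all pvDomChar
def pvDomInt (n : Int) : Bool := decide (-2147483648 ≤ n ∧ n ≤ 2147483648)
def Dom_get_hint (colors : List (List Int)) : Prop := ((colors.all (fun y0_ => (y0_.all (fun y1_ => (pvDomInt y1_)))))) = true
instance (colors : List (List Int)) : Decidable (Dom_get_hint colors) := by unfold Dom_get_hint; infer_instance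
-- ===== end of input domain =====

-- B replaces A's nested scan over destination tubes by one-pass indexes (the two smallest
-- empty-tube indices, and per top color the two smallest non-full-tube indices) and a single
-- pass over source tubes.

-- ===== PORT A =====
-- inner 'for j in range(len(colors))' loop; colors[j] is always in range here, so .getD [] is exact
def get_hint_inner (colors : List (List Int)) (i c : Int) : List Int → Option Int
  | [] => none
  | j :: js =>
    let t := (PySem.List.pyGet? colors j).getD []
    if i ≠ j ∧ t.length < 4 then
      -- 'len == 0 or colors[j][-1] == color_to_move'; t[-1] is only reached with t nonempty, so .getD 0 is exact
      if t.length = 0 ∨ (PySem.List.pyGet? t (-1)).getD 0 = c then some j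
      else get_hint_inner colors i c js
    else get_hint_inner colors i c js

-- outer 'for i in range(len(colors))' loop with early return
def get_hint_outer (colors : List (List Int)) : List Int → Option Int × Option Int
  | [] => (none, none)
  | i :: is =>
    let t := (PySem.List.pyGet? colors i).getD []
    if t.length > 0 then
      match get_hint_inner colors i ((PySem.List.pyGet? t (-1)).getD 0) (PySem.List.pyRange 0 colors.length 1) with
      | some j => (some i, some j)
      | none => get_hint_outer colors is
    else get_hint_outer colors is

def get_hint (colors : List (List Int)) : Option Int × Option Int :=
  get_hint_outer colors (PySem.List.pyRange 0 colors.length 1)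

-- ===== PORT B =====
-- first pass: the (at most) two smallest indices of empty tubes
def bEmptiesLoop (colors : List (List Int)) : List Int → List Int → List Int
  | [], acc => acc
  | j :: js, acc =>
    let t := (PySem.List.pyGet? colors j).getD []
    bEmptiesLoop colors js (if t.length = 0 ∧ acc.length < 2 then acc ++ [j] else acc)

-- second pass: top color ↦ (at most) two smallest indices of non-empty non-full tubes with that top;
-- 'setdefault(c, []); append if len < 2' is the modify below (a key left at [] is invisible to getD _ [])
def bTopsLoop (colors : List (List Int)) : List Int → PySem.Dict Int (List Int) → PySem.Dict Int (List Int)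
  | [], d => d
  | j :: js, d =>
    let t := (PySem.List.pyGet? colors j).getD []
    bTopsLoop colors js
      (if 0 < t.length ∧ t.length < 4 then
        d.modify ((PySem.List.pyGet? t (-1)).getD 0) [] (fun lst => if lst.length < 2 then lst ++ [j] else lst)
      else d)

-- third pass: first source tube with a valid destination; min over its (≤ 4) candidates
def bScanLoop (colors : List (List Int)) (empties : List Int) (tops : PySem.Dict Int (List Int)) : List Int → Option Int × Option Int
  | [] => (none, none)
  | i :: is =>
    let t := (PySem.List.pyGet? colors i).getD []
    if t.length > 0 then
      let cands := (empties ++ tops.getD ((PySem.List.pyGet? t (-1)).getD 0) []).filter (fun j => decide (j ≠ i))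
      match PySem.List.min? cands (fun x => x) with
      | some j => (some i, some j)
      | none => bScanLoop colors empties tops is
    else bScanLoop colors empties tops is

def get_hint_alt (colors : List (List Int)) : Option Int × Option Int :=
  bScanLoop colors
    (bEmptiesLoop colors (PySem.List.pyRange 0 colors.length 1) [])
    (bTopsLoop colors (PySem.List.pyRange 0 colors.length 1) PySem.Dict.empty)
    (PySem.List.pyRange 0 colors.length 1)

-- ===== PRECONDITION & SPEC =====
def Spec_get_hint (colors : List (List Int)) (out : Option Int × Option Int) : Prop := out = get_hint_alt colors
instance (colors : List (List Int)) (out : Option Int × Option Int) : Decidable (Spec_get_hint colors out) := by unfold Spec_get_hint; infer_instance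

-- ===== CLAIM (what is proved, stated in full; the proofs are below) =====
def Claim_equal_get_hint : Prop := ∀ (colors : List (List Int)), Dom_get_hint colors → Spec_get_hint colors (get_hint colors)

-- ===== LEMMAS AND PROOFS =====

-- the tube at index j (as both ports read it) and its top color
def pvTube (colors : List (List Int)) (j : Int) : List Int := (PySem.List.pyGet? colors j).getD []
def pvTop (t : List Int) : Int := (PySem.List.pyGet? t (-1)).getD 0
-- destination predicates: empty tube, and non-empty non-full tube with top color c
def pvE (colors : List (List Int)) (j : Int) : Bool := (pvTube colors j).length == 0
def pvC (colors : List (List Int)) (c j : Int) : Bool :=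
  decide (0 < (pvTube colors j).length) && decide ((pvTube colors j).length < 4) && (pvTop (pvTube colors j) == c)
-- min of two optional values
def omin : Option Int → Option Int → Option Int
  | none, b => b
  | some a, none => some a
  | some a, some b => some (min a b)

theorem min?_cons_omin (x : Int) (xs : List Int) : (x :: xs).min? = omin (some x) xs.min? := by
  cases xs with
  | nil => rfl
  | cons y ys => simp [List.min?_cons, omin]

theorem omin_assoc (a b c : Option Int) : omin (omin a b) c = omin a (omin b c) := by
  cases a <;> cases b <;> cases c <;> simp [omin, min_assoc]

theorem min?_append (l1 l2 : List Int) : (l1 ++ l2).min? = omin l1.min? l2.min? := by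
  induction l1 with
  | nil => cases l2 <;> simp [omin]
  | cons x xs ih => rw [List.cons_append, min?_cons_omin, ih, min?_cons_omin, omin_assoc]

theorem min?_filter_or (l : List Int) (p q : Int → Bool) :
    (l.filter (fun x => p x || q x)).min? = omin (l.filter p).min? (l.filter q).min? := by
  induction l with
  | nil => rfl
  | cons x xs ih =>
    by_cases hp : p x = true <;> by_cases hq : q x = true <;>
      simp only [List.filter_cons, hp, hq, Bool.or_true,
        Bool.or_false, if_pos, if_neg, Bool.not_eq_true,
        min?_cons_omin, ih] <;>
      cases (xs.filter p).min? <;> cases (xs.filter q).min? <;>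
        simp [omin, Int.min_def] <;> split_ifs <;> omega

-- min? of a ≤-sorted list is its head
theorem min?_eq_head?_of_sorted (l : List Int) (h : l.Pairwise (· ≤ ·)) : l.min? = l.head? :=
  List.min?_eq_head? (h.imp fun hab => min_eq_left hab)

-- pysem min? with identity key is List.min?
theorem pymin_id (xs : List Int) : PySem.List.min? xs (fun x => x) = xs.min? := by
  cases xs with
  | nil => rfl
  | cons a as => rw [PySem.List.min?_id_cons]; rfl

-- keeping only the two smallest of a <-sorted candidate list loses no candidate ≠ i
theorem min?_take2_filter (F : List Int) (i : Int) (h : F.Pairwise (· < ·)) :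
    ((F.take 2).filter (fun j => decide (j ≠ i))).min? = (F.filter (fun j => decide (j ≠ i))).min? := by
  have hs : (F.filter (fun j => decide (j ≠ i))).Pairwise (· ≤ ·) :=
    (h.filter _).imp fun hab => le_of_lt hab
  rw [min?_eq_head?_of_sorted _ hs]
  cases F with
  | nil => rfl
  | cons a F' =>
  cases F' with
  | nil =>
    by_cases ha : a = i
    · simp [ha]
    · simp [ha]
  | cons b rest =>
    have hab : a < b := (List.pairwise_cons.mp h).1 b (List.mem_cons_self ..)
    have harest : ∀ x ∈ rest, a < x := fun x hx =>
      (List.pairwise_cons.mp h).1 x (List.mem_cons_of_mem _ hx)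
    by_cases ha : a = i
    · have hb : (b ≠ i) := by omega
      simp [ha, hb]
    · by_cases hb : b = i
      · simp [ha, hb]
      · simp [ha, hb, min_eq_left (le_of_lt hab)]

-- A's inner loop finds the first (= smallest-index) valid destination
theorem innerA_eq (colors : List (List Int)) (i c : Int) (l : List Int) :
    get_hint_inner colors i c l =
      (l.filter (fun j => (pvE colors j || pvC colors c j) && decide (j ≠ i))).head? := by
  induction l with
  | nil => rfl
  | cons j js ih =>
    show (if i ≠ j ∧ (pvTube colors j).length < 4 then
            if (pvTube colors j).length = 0 ∨ pvTop (pvTube colors j) = c then some j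
            else get_hint_inner colors i c js
          else get_hint_inner colors i c js) = _
    rw [List.filter_cons]
    by_cases h1 : i ≠ j ∧ (pvTube colors j).length < 4
    · by_cases h2 : (pvTube colors j).length = 0 ∨ pvTop (pvTube colors j) = c
      · have hv : ((pvE colors j || pvC colors c j) && decide (j ≠ i)) = true := by
          simp only [pvE, pvC, Bool.and_eq_true, Bool.or_eq_true, beq_iff_eq,
            decide_eq_true_eq, Bool.and_eq_true]
          refine ⟨?_, fun e => h1.1 e.symm⟩
          rcases h2 with h2 | h2
          · exact Or.inl (by omega)
          · rcases Nat.eq_zero_or_pos (pvTube colors j).length with h0 | h0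
            · exact Or.inl (by omega)
            · exact Or.inr ⟨⟨by simpa using h0, by simpa using h1.2⟩, h2⟩
        rw [if_pos h1, if_pos h2, hv]; rfl
      · have hv : ((pvE colors j || pvC colors c j) && decide (j ≠ i)) = false := by
          rw [← Bool.not_eq_true]
          simp only [pvE, pvC, Bool.and_eq_true, Bool.or_eq_true, beq_iff_eq, decide_eq_true_eq]
          rintro ⟨h0 | ⟨⟨hpos, hlt⟩, htop⟩, hji⟩
          · exact h2 (Or.inl h0)
          · exact h2 (Or.inr htop)
        rw [if_pos h1, if_neg h2, hv, ih]; rfl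
    · have hv : ((pvE colors j || pvC colors c j) && decide (j ≠ i)) = false := by
        rw [← Bool.not_eq_true]
        simp only [pvE, pvC, Bool.and_eq_true, Bool.or_eq_true, beq_iff_eq, decide_eq_true_eq]
        rintro ⟨h0 | ⟨⟨hpos, hlt⟩, htop⟩, hji⟩
        · exact h1 ⟨fun e => hji e.symm, by omega⟩
        · exact h1 ⟨fun e => hji e.symm, hlt⟩
      rw [if_neg h1, hv, ih]; rfl

theorem empties_eq (colors : List (List Int)) (l : List Int) (acc : List Int) (hacc : acc.length ≤ 2) :
    bEmptiesLoop colors l acc = (acc ++ l.filter (pvE colors)).take 2 := by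
  induction l generalizing acc with
  | nil =>
    show acc = (acc ++ []).take 2
    rw [List.append_nil, List.take_of_length_le hacc]
  | cons j js ih =>
    show bEmptiesLoop colors js (if (pvTube colors j).length = 0 ∧ acc.length < 2 then acc ++ [j] else acc) = _
    rw [List.filter_cons]
    by_cases he : (pvTube colors j).length = 0
    · have hE : pvE colors j = true := by simp [pvE, he]
      by_cases hl : acc.length < 2
      · rw [if_pos ⟨he, hl⟩, ih _ (by simp; omega), hE]
        simp
      · have h2 : acc.length = 2 := by omega
        rw [if_neg (by tauto), ih _ hacc, hE]
        simp only [ite_true]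
        rw [List.take_append_of_le_length (by omega), List.take_append_of_le_length (by omega)]
    · have hE : pvE colors j = false := by simp [pvE, he]
      rw [if_neg (by tauto), ih _ hacc, hE]
      simp

theorem tops_eq (colors : List (List Int)) (l : List Int) (d : PySem.Dict Int (List Int))
    (hd : ∀ c, ((d.getD c []).length ≤ 2)) (c : Int) :
    (bTopsLoop colors l d).getD c [] = (d.getD c [] ++ l.filter (pvC colors c)).take 2 := by
  induction l generalizing d with
  | nil =>
    show d.getD c [] = (d.getD c [] ++ []).take 2
    rw [List.append_nil, List.take_of_length_le (hd c)]
  | cons j js ih =>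
    show (bTopsLoop colors js
        (if 0 < (pvTube colors j).length ∧ (pvTube colors j).length < 4 then
          d.modify (pvTop (pvTube colors j)) [] (fun lst => if lst.length < 2 then lst ++ [j] else lst)
        else d)).getD c []
      = _
    rw [List.filter_cons]
    by_cases hcond : 0 < (pvTube colors j).length ∧ (pvTube colors j).length < 4
    · rw [if_pos hcond]
      set k := pvTop (pvTube colors j) with hk
      set d' := d.modify k [] (fun lst => if lst.length < 2 then lst ++ [j] else lst) with hd'
      have hget : ∀ c', d'.getD c' [] =
          if c' = k then (if (d.getD k []).length < 2 then d.getD k [] ++ [j] else d.getD k []) else d.getD c' [] := by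
        intro c'; rw [hd', PySem.Dict.getD_modify]
      have hd'2 : ∀ c', ((d'.getD c' []).length ≤ 2) := by
        intro c'; rw [hget c']
        split_ifs with h1 h2
        · have := hd k; simp; omega
        · exact hd k
        · exact hd c'
      rw [ih d' hd'2]
      by_cases hck : c = k
      · have hC : pvC colors c j = true := by
          simp only [pvC, Bool.and_eq_true, beq_iff_eq, decide_eq_true_eq]
          exact ⟨⟨hcond.1, hcond.2⟩, by rw [← hk, hck]⟩
        rw [hC, hget c, if_pos hck, hck]
        simp only [ite_true]
        by_cases h2 : (d.getD k []).length < 2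
        · rw [if_pos h2]; simp
        · rw [if_neg h2]
          have hlen : (d.getD k []).length = 2 := by have := hd k; omega
          rw [List.take_append_of_le_length (by omega), List.take_append_of_le_length (by omega)]
      · have hC : pvC colors c j = false := by
          simp only [pvC, Bool.and_eq_false_iff, beq_eq_false_iff_ne]
          exact Or.inr fun e => hck (by rw [← e, hk])
        rw [hC, hget c, if_neg hck]
        simp
    · rw [if_neg hcond]
      have hC : pvC colors c j = false := by
        simp only [pvC, Bool.and_eq_false_iff, Bool.and_eq_false_iff, decide_eq_false_iff_not]
        left
        by_cases h0 : 0 < (pvTube colors j).length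
        · exact Or.inr fun h4 => hcond ⟨h0, h4⟩
        · exact Or.inl h0
      rw [hC, ih d hd]
      simp

-- a && c || b && c = (a || b) && c, pointwise on Bool
theorem bool_or_and_right (a b c : Bool) : ((c && a) || (c && b)) = ((a || b) && c) := by
  cases a <;> cases b <;> cases c <;> rfl

-- B's candidate minimum is exactly A's first valid destination
theorem candidates_eq (colors : List (List Int)) (i c : Int) :
    (((PySem.List.pyRange 0 colors.length 1).filter (pvE colors)).take 2 ++
      ((PySem.List.pyRange 0 colors.length 1).filter (pvC colors c)).take 2
      |>.filter (fun j => decide (j ≠ i))).min?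
    = ((PySem.List.pyRange 0 colors.length 1).filter
        (fun j => (pvE colors j || pvC colors c j) && decide (j ≠ i))).head? := by
  have hR := PySem.List.pairwise_lt_pyRange_one 0 (colors.length : Int)
  rw [List.filter_append, min?_append,
    min?_take2_filter _ _ (hR.filter _), min?_take2_filter _ _ (hR.filter _),
    List.filter_filter, List.filter_filter, ← min?_filter_or,
    List.filter_congr (fun x _ => bool_or_and_right (pvE colors x) (pvC colors c x) (decide (x ≠ i))),
    min?_eq_head?_of_sorted _ ((hR.filter _).imp fun hab => le_of_lt hab)]

theorem scan_eq (colors : List (List Int)) (l : List Int) :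
    bScanLoop colors
      (bEmptiesLoop colors (PySem.List.pyRange 0 colors.length 1) [])
      (bTopsLoop colors (PySem.List.pyRange 0 colors.length 1) PySem.Dict.empty) l
    = get_hint_outer colors l := by
  induction l with
  | nil => rfl
  | cons i is ih =>
    show (if (pvTube colors i).length > 0 then
            match PySem.List.min? (((bEmptiesLoop colors (PySem.List.pyRange 0 colors.length 1) []) ++
                (bTopsLoop colors (PySem.List.pyRange 0 colors.length 1) PySem.Dict.empty).getD
                  (pvTop (pvTube colors i)) []).filter (fun j => decide (j ≠ i))) (fun x => x) with
            | some j => (some i, some j)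
            | none => bScanLoop colors _ _ is
          else bScanLoop colors _ _ is)
        = (if (pvTube colors i).length > 0 then
            match get_hint_inner colors i (pvTop (pvTube colors i)) (PySem.List.pyRange 0 colors.length 1) with
            | some j => (some i, some j)
            | none => get_hint_outer colors is
          else get_hint_outer colors is)
    by_cases hne : (pvTube colors i).length > 0
    · rw [if_pos hne, if_pos hne]
      have hmin : PySem.List.min? (((bEmptiesLoop colors (PySem.List.pyRange 0 colors.length 1) []) ++
          (bTopsLoop colors (PySem.List.pyRange 0 colors.length 1) PySem.Dict.empty).getD
            (pvTop (pvTube colors i)) []).filter (fun j => decide (j ≠ i))) (fun x => x)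
          = get_hint_inner colors i (pvTop (pvTube colors i)) (PySem.List.pyRange 0 colors.length 1) := by
        rw [pymin_id,
          empties_eq colors _ [] (by simp),
          tops_eq colors _ PySem.Dict.empty (fun c => by simp [PySem.Dict.getD_empty]),
          PySem.Dict.getD_empty]
        simp only [List.nil_append]
        rw [candidates_eq, innerA_eq]
      rw [hmin, ih]
    · rw [if_neg hne, if_neg hne, ih]

-- ===== VERDICT (by name: the statement is the Claim_ definition above) =====
theorem get_hint_spec : Claim_equal_get_hint := by
  intro colors _
  unfold Spec_get_hint get_hint get_hint_alt
  exact (scan_eq colors _).symm
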